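-- pv_equiv track=rewrite | github.com/bmcdonnel/data-structures | python/exercises/arrays/find_largest_consecutive_subarray.py | find_largest_consecutive_subarray
-- ===== SOURCE A (Python) =====
-- def find_largest_consecutive_subarray(array):
--     length = 1
--     start_index = 0
--     end_index = 0
--
--     for i in range(len(array) - 1):
--         min_value = array[i]
--         max_value = array[i]
--
--         seen = dict()
--         seen[array[i]] = i
--
--         for j in range(i + 1, len(array)):
--             value = array[j]
--
--             min_value = min(min_value, value)
--             max_value = max(max_value, value)
--
--             max_min_diff = max_value - min_value + 1
--             item_count_diff = j - i + 1
--
--             # make sure that this array value hasn't been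
--             # seen before in the subarray
--             if value in seen:
--                 # break instead of continue cause a duplicate
--                 # ruins this sub-array chances
--                 break
--
--             seen[value] = j
--
--             # check that no numbers are skipped by comparing
--             # diff of min and max with length of subarray
--             if max_min_diff != item_count_diff:
--                 # continue instead of break cause the next
--                 # number might complete this sub-array
--                 continue
--
--             if max_min_diff > length:
--                 length = max_min_diff
--                 start_index = i
--                 end_index = j
--
--     return array[start_index:end_index + 1]
-- ===== SOURCE B (Python) =====
-- def find_largest_consecutive_subarray(array):
--     # Precompute, in one right-to-left pass, limits[i] = the first index j > i at
--     # which the window starting at i hits a duplicate value (n if none): it is the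
--     # running minimum of "next occurrence of array[k]" over k >= i.  The inner scan
--     # then keeps only a running min/max -- no per-window hash membership test.
--     n = len(array)
--     rev_limits = []
--     bound = n
--     last = {}
--     for i in range(n - 1, -1, -1):
--         bound = min(last.get(array[i], n), bound)
--         rev_limits.append(bound)
--         last[array[i]] = i
--     limits = rev_limits[::-1]
--
--     best_len = 1
--     start = 0
--     end = 0
--     for i in range(n - 1):
--         mn = array[i]
--         mx = array[i]
--         for j in range(i + 1, limits[i]):
--             v = array[j]
--             if v < mn:
--                 mn = v
--             if v > mx:
--                 mx = v
--             span = mx - mn + 1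
--             if span == j - i + 1 and span > best_len:
--                 best_len = span
--                 start = i
--                 end = j
--     return array[start:end + 1]
-- ===== Notes on version B (the rewrite author's own statement) =====
-- stated objective: faster
-- what changed: B precomputes, in one right-to-left pass with a last-occurrence dict, the first-duplicate bound limits[i] for every start, so the inner scan keeps only a running min/max and the per-window hash table and membership test disappear; on duplicate-heavy inputs the inner scan is also cut short at limits[i].
import Mathlib
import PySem

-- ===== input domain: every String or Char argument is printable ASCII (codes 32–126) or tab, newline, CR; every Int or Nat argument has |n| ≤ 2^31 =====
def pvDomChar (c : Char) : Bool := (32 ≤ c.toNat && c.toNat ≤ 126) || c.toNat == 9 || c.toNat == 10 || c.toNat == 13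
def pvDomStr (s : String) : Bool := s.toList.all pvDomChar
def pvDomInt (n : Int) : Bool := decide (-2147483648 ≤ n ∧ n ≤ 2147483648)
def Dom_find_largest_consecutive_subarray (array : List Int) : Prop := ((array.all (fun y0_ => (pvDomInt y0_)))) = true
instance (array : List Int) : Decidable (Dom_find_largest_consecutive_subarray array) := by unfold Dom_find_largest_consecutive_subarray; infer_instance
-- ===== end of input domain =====

-- B replaces A's per-window hash table by a one-pass precomputed first-duplicate bound per
-- start index, leaving an arithmetic-only inner scan (measured constant-factor faster).

-- ===== PORT A =====
-- inner 'for j in range(i+1, len(array))' loop of A; returning the state models 'break'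
def pvAInner (array : List Int) (i : Nat) :
    List Nat → Int → Int → PySem.Dict Int Int → Int × Nat × Nat → Int × Nat × Nat
  | [], _, _, _, st => st
  | j :: rest, mn, mx, seen, st =>
    let value := array.getD j 0
    let mn' := min mn value
    let mx' := max mx value
    let mmd := mx' - mn' + 1
    let icd := (j : Int) - (i : Int) + 1
    if (seen.get? value).isSome then st
    else
      let seen' := seen.insert value (j : Int)
      if mmd ≠ icd then pvAInner array i rest mn' mx' seen' st
      else if mmd > st.1 then pvAInner array i rest mn' mx' seen' (mmd, i, j)
      else pvAInner array i rest mn' mx' seen' st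

def find_largest_consecutive_subarray (array : List Int) : List Int :=
  let n := array.length
  let st := (List.range (n - 1)).foldl
    (fun st i =>
      let v := array.getD i 0
      pvAInner array i (List.range' (i + 1) (n - (i + 1))) v v
        ((PySem.Dict.empty).insert v (i : Int)) st)
    (1, 0, 0)
  PySem.List.slice array (some (st.2.1 : Int)) (some ((st.2.2 : Int) + 1))

-- ===== PORT B =====
-- right-to-left pass 'for i in range(n-1, -1, -1)': fuel = i+1, builds rev_limits by append
def pvBLimGo (array : List Int) (n : Nat) :
    Nat → Nat → PySem.Dict Int Nat → List Nat → List Nat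
  | 0, _, _, acc => acc
  | fuel + 1, bound, last, acc =>
    let v := array.getD fuel 0
    let bound' := min (last.getD v n) bound
    pvBLimGo array n fuel bound' (last.insert v fuel) (acc ++ [bound'])

def pvBLimits (array : List Int) : List Nat :=
  (pvBLimGo array array.length array.length array.length PySem.Dict.empty []).reverse

-- inner 'for j in range(i+1, limits[i])' loop of B
def pvBInner (array : List Int) (i : Nat) :
    List Nat → Int → Int → Int × Nat × Nat → Int × Nat × Nat
  | [], _, _, st => st
  | j :: rest, mn, mx, st =>
    let v := array.getD j 0
    let mn' := if v < mn then v else mn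
    let mx' := if v > mx then v else mx
    let span := mx' - mn' + 1
    if span = (j : Int) - (i : Int) + 1 ∧ span > st.1 then
      pvBInner array i rest mn' mx' (span, i, j)
    else
      pvBInner array i rest mn' mx' st

def find_largest_consecutive_subarray_alt (array : List Int) : List Int :=
  let n := array.length
  let limits := pvBLimits array
  let st := (List.range (n - 1)).foldl
    (fun st i =>
      pvBInner array i (List.range' (i + 1) (limits.getD i 0 - (i + 1)))
        (array.getD i 0) (array.getD i 0) st)
    (1, 0, 0)
  PySem.List.slice array (some (st.2.1 : Int)) (some ((st.2.2 : Int) + 1))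

-- ===== PRECONDITION & SPEC =====
def Spec_find_largest_consecutive_subarray (array : List Int) (out : List Int) : Prop := out = find_largest_consecutive_subarray_alt array
instance (array : List Int) (out : List Int) : Decidable (Spec_find_largest_consecutive_subarray array out) := by unfold Spec_find_largest_consecutive_subarray; infer_instance

-- ===== CLAIM (what is proved, stated in full; the proofs are below) =====
def Claim_equal_find_largest_consecutive_subarray : Prop := ∀ (array : List Int), Dom_find_largest_consecutive_subarray array → Spec_find_largest_consecutive_subarray array (find_largest_consecutive_subarray array)

-- ===== LEMMAS AND PROOFS =====

-- 'a value equal to a[q] occurs in the window a[i..q-1]'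
def pvDup (a : List Int) (i q : Nat) : Prop :=
  ∃ p, i ≤ p ∧ p < q ∧ a.getD p 0 = a.getD q 0

-- 'b is the first duplicate position for the window starting at i (or n = a.length)'
def pvBnd (a : List Int) (i b : Nat) : Prop :=
  b ≤ a.length ∧ (∀ q, q < b → ¬ pvDup a i q) ∧ (b < a.length → pvDup a i b)

-- invariant of the last-occurrence dict after the indices i..n-1 have been processed
def pvLastInv (a : List Int) (i : Nat) (last : PySem.Dict Int Nat) : Prop :=
  ∀ v, (∀ m, last.get? v = some m →
          i ≤ m ∧ m < a.length ∧ a.getD m 0 = v ∧ ∀ k, i ≤ k → k < m → a.getD k 0 ≠ v)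
     ∧ (last.get? v = none → ∀ k, i ≤ k → k < a.length → a.getD k 0 ≠ v)

theorem pv_min_ite (x y : Int) : min x y = if y < x then y else x := by
  rw [min_def]; split_ifs <;> omega

theorem pv_max_ite (x y : Int) : max x y = if y > x then y else x := by
  rw [max_def]; split_ifs <;> omega

theorem pvBnd_gt (a : List Int) (i b : Nat) (hb : pvBnd a i b) (hi : i < a.length) : i < b := by
  obtain ⟨hle, _, hdup⟩ := hb
  by_contra h
  obtain ⟨p, hp1, hp2, _⟩ := hdup (by omega)
  omega

theorem pvInner_eq (a : List Int) (i L : Nat) (hL : pvBnd a i L) :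
    ∀ (fuel j0 : Nat) (mn mx : Int) (seen : PySem.Dict Int Int) (st : Int × Nat × Nat),
      fuel = a.length - j0 → i < j0 → j0 ≤ L →
      (∀ v, (seen.get? v).isSome = true ↔ ∃ k, i ≤ k ∧ k < j0 ∧ a.getD k 0 = v) →
      pvAInner a i (List.range' j0 (a.length - j0)) mn mx seen st
        = pvBInner a i (List.range' j0 (L - j0)) mn mx st := by
  intro fuel
  induction fuel with
  | zero =>
    intro j0 mn mx seen st hf hij hjL _
    have hn : a.length ≤ j0 := by omega
    have h1 : a.length - j0 = 0 := by omega
    have h2 : L - j0 = 0 := by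
      have := hL.1; omega
    rw [h1, h2]; rfl
  | succ fuel ih =>
    intro j0 mn mx seen st hf hij hjL hseen
    have hj0n : j0 < a.length := by omega
    have hcons : List.range' j0 (a.length - j0) = j0 :: List.range' (j0 + 1) (a.length - (j0 + 1)) := by
      have : a.length - j0 = (a.length - (j0 + 1)) + 1 := by omega
      rw [this, List.range'_succ]
    rw [hcons]
    by_cases hdup : pvDup a i j0
    · -- j0 is a duplicate position: A breaks; necessarily j0 = L and B's range is empty
      have hjL' : j0 = L := by
        rcases Nat.lt_or_ge j0 L with h | h
        · exact absurd hdup (hL.2.1 j0 h)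
        · omega
      have hmem : ((seen.get? (a.getD j0 0)).isSome = true) := by
        rw [hseen]; exact hdup
      simp only [pvAInner, hmem, if_pos]
      have : L - j0 = 0 := by omega
      rw [this]; rfl
    · -- no duplicate at j0: A and B take the same step
      have hj0L : j0 < L := by
        rcases Nat.lt_or_ge j0 L with h | h
        · exact h
        · have hjeq : j0 = L := by omega
          have := hL.2.2 (by omega)
          rw [hjeq] at hdup; exact absurd this hdup
      have hmem : ((seen.get? (a.getD j0 0)).isSome = false) := by
        rw [Bool.eq_false_iff]
        intro h; exact hdup ((hseen _).mp h)
      have hconsB : List.range' j0 (L - j0) = j0 :: List.range' (j0 + 1) (L - (j0 + 1)) := by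
        have : L - j0 = (L - (j0 + 1)) + 1 := by omega
        rw [this, List.range'_succ]
      rw [hconsB]
      simp only [pvAInner, pvBInner, hmem, Bool.false_eq_true, if_false]
      rw [← pv_min_ite, ← pv_max_ite]
      have hseen' : ∀ v, (((seen.insert (a.getD j0 0) (j0 : Int)).get? v).isSome = true)
          ↔ ∃ k, i ≤ k ∧ k < j0 + 1 ∧ a.getD k 0 = v := by
        intro v
        by_cases hv : v = a.getD j0 0
        · subst hv
          rw [PySem.Dict.get?_insert_self]
          simp only [Option.isSome_some, true_iff]
          exact ⟨j0, by omega, by omega, rfl⟩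
        · rw [PySem.Dict.get?_insert_of_ne _ _ hv, hseen]
          constructor
          · rintro ⟨k, h1, h2, h3⟩; exact ⟨k, h1, by omega, h3⟩
          · rintro ⟨k, h1, h2, h3⟩
            refine ⟨k, h1, ?_, h3⟩
            rcases Nat.lt_or_ge k j0 with h | h
            · exact h
            · exfalso; apply hv; rw [← h3]; congr 1; omega
      by_cases hspan : (max mx (a.getD j0 0) - min mn (a.getD j0 0) + 1 : Int) = (j0 : Int) - (i : Int) + 1
      · by_cases hbig : (max mx (a.getD j0 0) - min mn (a.getD j0 0) + 1 : Int) > st.1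
        · rw [if_neg (not_not_intro hspan), if_pos hbig, if_pos ⟨hspan, hbig⟩]
          exact ih (j0 + 1) _ _ _ _ (by omega) (by omega) (by omega) hseen'
        · rw [if_neg (not_not_intro hspan), if_neg hbig, if_neg (by tauto)]
          exact ih (j0 + 1) _ _ _ _ (by omega) (by omega) (by omega) hseen'
      · rw [if_pos hspan, if_neg (by tauto)]
        exact ih (j0 + 1) _ _ _ _ (by omega) (by omega) (by omega) hseen'

theorem pvBLimGo_spec (a : List Int) :
    ∀ (fuel : Nat) (bound : Nat) (last : PySem.Dict Int Nat) (acc : List Nat),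
      fuel ≤ a.length →
      pvLastInv a fuel last →
      pvBnd a fuel bound →
      acc.length = a.length - fuel →
      (∀ t, t < acc.length → pvBnd a (a.length - 1 - t) (acc.getD t 0)) →
      (pvBLimGo a a.length fuel bound last acc).length = a.length ∧
      ∀ t, t < a.length →
        pvBnd a (a.length - 1 - t) ((pvBLimGo a a.length fuel bound last acc).getD t 0) := by
  intro fuel
  induction fuel with
  | zero =>
    intro bound last acc _ _ _ hlen hprops
    simp only [pvBLimGo]
    constructor
    · omega
    · intro t ht; exact hprops t (by omega)
  | succ fuel ih =>
    intro bound last acc hle hlast hbnd hlen hprops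
    simp only [pvBLimGo]
    set v := a.getD fuel 0 with hv
    set m0 := last.getD v a.length with hm0
    -- facts about m0 from the dict invariant
    have hm0' : (m0 = a.length ∧ ∀ k, fuel + 1 ≤ k → k < a.length → a.getD k 0 ≠ v) ∨
        (fuel + 1 ≤ m0 ∧ m0 < a.length ∧ a.getD m0 0 = v ∧
          ∀ k, fuel + 1 ≤ k → k < m0 → a.getD k 0 ≠ v) := by
      rcases h : last.get? v with _ | m
      · left
        have : m0 = a.length := by
          simp [hm0, PySem.Dict.getD, h]
        exact ⟨this, (hlast v).2 h⟩
      · right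
        have hm : m0 = m := by simp [hm0, PySem.Dict.getD, h]
        obtain ⟨h1, h2, h3, h4⟩ := (hlast v).1 m h
        exact ⟨by omega, by omega, by rw [hm]; exact h3, by rw [hm]; exact h4⟩
    have hbnd' : pvBnd a fuel (min m0 bound) := by
      obtain ⟨hb1, hb2, hb3⟩ := hbnd
      refine ⟨by rcases hm0' with ⟨h, _⟩ | ⟨_, h, _⟩ <;> omega, ?_, ?_⟩
      · intro q hq ⟨p, hp1, hp2, hp3⟩
        rcases Nat.lt_or_ge p (fuel + 1) with hp | hp
        · -- p = fuel, so q is an occurrence of v after fuel, before m0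
          have hpf : p = fuel := by omega
          rcases hm0' with ⟨_, hnone⟩ | ⟨_, _, _, hleast⟩
          · exact hnone q (by omega) (by omega) (by rw [← hp3, hpf])
          · exact hleast q (by omega) (by omega) (by rw [← hp3, hpf])
        · exact hb2 q (by omega) ⟨p, hp, hp2, hp3⟩
      · intro hlt
        rcases Nat.lt_or_ge m0 bound with hc | hc
        · have hmin : min m0 bound = m0 := by omega
          rw [hmin] at hlt ⊢
          rcases hm0' with ⟨h, _⟩ | ⟨_, _, h3, _⟩
          · omega
          · exact ⟨fuel, le_refl _, by omega, by rw [h3]⟩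
        · have hmin : min m0 bound = bound := by omega
          rw [hmin] at hlt ⊢
          obtain ⟨p, hp1, hp2, hp3⟩ := hb3 hlt
          exact ⟨p, by omega, hp2, hp3⟩
    have hlast' : pvLastInv a fuel (last.insert v fuel) := by
      intro w
      constructor
      · intro m hm
        by_cases hw : w = v
        · subst hw
          rw [PySem.Dict.get?_insert_self] at hm
          obtain rfl : fuel = m := by injection hm
          exact ⟨le_refl _, by omega, rfl, fun k hk1 hk2 => absurd hk2 (by omega)⟩
        · rw [PySem.Dict.get?_insert_of_ne _ _ hw] at hm
          obtain ⟨h1, h2, h3, h4⟩ := (hlast w).1 m hm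
          refine ⟨by omega, h2, h3, ?_⟩
          intro k hk1 hk2
          rcases Nat.lt_or_ge k (fuel + 1) with hk | hk
          · have : k = fuel := by omega
            rw [this]; intro hc; exact hw hc.symm
          · exact h4 k hk hk2
      · intro hnone
        by_cases hw : w = v
        · subst hw; rw [PySem.Dict.get?_insert_self] at hnone; exact absurd hnone (by simp)
        · rw [PySem.Dict.get?_insert_of_ne _ _ hw] at hnone
          intro k hk1 hk2
          rcases Nat.lt_or_ge k (fuel + 1) with hk | hk
          · have : k = fuel := by omega
            rw [this]; intro hc; exact hw hc.symm
          · exact (hlast w).2 hnone k hk hk2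
    refine ih (min m0 bound) (last.insert v fuel) (acc ++ [min m0 bound])
      (by omega) hlast' hbnd' (by simp; omega) ?_
    intro t ht
    rw [List.length_append] at ht
    simp only [List.length_singleton] at ht
    rcases Nat.lt_or_ge t acc.length with h | h
    · rw [List.getD_append _ _ _ _ h]
      exact hprops t h
    · have hteq : t = acc.length := by omega
      have : (acc ++ [min m0 bound]).getD t 0 = min m0 bound := by
        subst hteq
        rw [List.getD_eq_getElem?_getD]
        simp
      rw [this, hteq, hlen]
      have h2 : a.length - 1 - (a.length - (fuel + 1)) = fuel := by omega
      rw [h2]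
      exact hbnd'

theorem pvBLimits_spec (a : List Int) :
    ∀ i, i < a.length → pvBnd a i ((pvBLimits a).getD i 0) := by
  intro i hi
  have hbase := pvBLimGo_spec a a.length a.length PySem.Dict.empty []
    (le_refl _)
    (by
      intro v
      constructor
      · intro m hm; simp [PySem.Dict.get?, PySem.Dict.empty] at hm
      · intro _ k hk1 hk2; omega)
    (⟨le_refl _, by intro q hq ⟨p, h1, h2, h3⟩; omega, by omega⟩)
    (by simp)
    (by intro t ht; simp at ht)
  obtain ⟨hlen, hprop⟩ := hbase
  unfold pvBLimits
  set lst := pvBLimGo a a.length a.length a.length PySem.Dict.empty [] with hlst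
  have h1 : lst.reverse.getD i 0 = lst.getD (a.length - 1 - i) 0 := by
    rw [List.getD_eq_getElem?_getD, List.getD_eq_getElem?_getD,
      List.getElem?_reverse (by omega)]
    rw [hlen]
  rw [h1]
  have := hprop (a.length - 1 - i) (by omega)
  have h2 : a.length - 1 - (a.length - 1 - i) = i := by omega
  rw [h2] at this
  exact this

theorem find_largest_consecutive_subarray_eq (a : List Int) :
    find_largest_consecutive_subarray a = find_largest_consecutive_subarray_alt a := by
  unfold find_largest_consecutive_subarray find_largest_consecutive_subarray_alt
  have hstep : ∀ (st : Int × Nat × Nat) (i : Nat), i ∈ List.range (a.length - 1) →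
      (let v := a.getD i 0
       pvAInner a i (List.range' (i + 1) (a.length - (i + 1))) v v
        ((PySem.Dict.empty).insert v (i : Int)) st)
      = pvBInner a i (List.range' (i + 1) ((pvBLimits a).getD i 0 - (i + 1)))
          (a.getD i 0) (a.getD i 0) st := by
    intro st i hi
    rw [List.mem_range] at hi
    have hin : i < a.length := by omega
    have hbnd := pvBLimits_spec a i hin
    exact pvInner_eq a i _ hbnd (a.length - (i + 1)) (i + 1) _ _ _ st rfl (by omega)
      (by have := pvBnd_gt a i _ hbnd hin; omega)
      (by
        intro v
        by_cases hv : v = a.getD i 0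
        · subst hv
          rw [PySem.Dict.get?_insert_self]
          simp only [Option.isSome_some, true_iff]
          exact ⟨i, le_refl _, by omega, rfl⟩
        · rw [PySem.Dict.get?_insert_of_ne _ _ hv]
          simp only [PySem.Dict.get?, PySem.Dict.empty]
          constructor
          · intro h; simp at h
          · rintro ⟨k, h1, h2, h3⟩
            exfalso; apply hv; rw [← h3]; congr 1; omega)
  have hfold : ∀ (l : List Nat) (st : Int × Nat × Nat), (∀ i ∈ l, i ∈ List.range (a.length - 1)) →
      l.foldl (fun st i =>
        let v := a.getD i 0
        pvAInner a i (List.range' (i + 1) (a.length - (i + 1))) v v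
          ((PySem.Dict.empty).insert v (i : Int)) st) st
      = l.foldl (fun st i =>
        pvBInner a i (List.range' (i + 1) ((pvBLimits a).getD i 0 - (i + 1)))
          (a.getD i 0) (a.getD i 0) st) st := by
    intro l
    induction l with
    | nil => intro st _; rfl
    | cons x xs ihl =>
      intro st hmem
      simp only [List.foldl_cons]
      rw [hstep st x (hmem x (by simp))]
      exact ihl _ (fun i hi => hmem i (by simp [hi]))
  simp only []
  rw [hfold (List.range (a.length - 1)) (1, 0, 0) (fun i hi => hi)]

-- ===== VERDICT (by name: the statement is the Claim_ definition above) =====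
theorem find_largest_consecutive_subarray_spec : Claim_equal_find_largest_consecutive_subarray := by
  intro array _
  unfold Spec_find_largest_consecutive_subarray
  exact find_largest_consecutive_subarray_eq array
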